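-- pv_equiv track=rewrite | github.com/magicmarymoore/aoc2022 | day6/day6.py | parteDos
-- ===== SOURCE A (Python) =====
-- def parteDos(datos : list) -> int:
--     a = []
--     for x in range(13, len(datos)):
--         for y in range(14):
--             a.append(datos[x-y]) # find the 14 previous values
--         b = [*set(a)] # remove duplicates
--         if (len(b) == len(a)): # if the original didn't have duplicates, yay!!
--             return x+1
--         a.clear()
--     return -1
-- ===== SOURCE B (Python) =====
-- def parteDos(datos: list) -> int:
--     # single pass: keep the longest duplicate-free run of recent values, newest first
--     window = []
--     for i, c in enumerate(datos):
--         if c in window: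
--             window = window[:window.index(c)]
--         window.insert(0, c)
--         if len(window) == 14:
--             return i + 1
--     return -1
-- ===== Notes on version B (the rewrite author's own statement) =====
-- stated objective: faster
-- what changed: A rebuilds the 14-element window from scratch at every index and deduplicates it with set(); B makes a single incremental pass maintaining the current duplicate-free run of recent values, cutting it at a repeated value and returning as soon as it reaches length 14.
import Mathlib
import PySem

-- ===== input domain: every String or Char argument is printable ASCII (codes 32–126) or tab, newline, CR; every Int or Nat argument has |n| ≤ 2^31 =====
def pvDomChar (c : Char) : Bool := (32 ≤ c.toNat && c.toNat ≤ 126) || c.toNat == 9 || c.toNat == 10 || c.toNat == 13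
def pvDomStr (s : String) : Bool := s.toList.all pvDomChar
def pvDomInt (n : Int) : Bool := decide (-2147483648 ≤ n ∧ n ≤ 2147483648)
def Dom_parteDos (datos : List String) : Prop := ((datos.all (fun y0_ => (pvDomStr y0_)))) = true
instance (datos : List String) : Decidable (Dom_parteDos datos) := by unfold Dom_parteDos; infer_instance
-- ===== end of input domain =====

-- B replaces A's rebuild-and-dedup of every 14-element window by a single pass that
-- maintains the current duplicate-free run of recent values (objective: alternative).


-- ===== PORT A =====
-- loop 'for x in range(13, len(datos))'; the inner loop builds a = [datos[x], ..., datos[x-13]].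
-- datos[x-y] is always in range (13 <= x < len, 0 <= y <= 13), so pyGetD with a dummy default is exact here.
def parteDosA_go (datos : List String) : List Int → Int
  | [] => -1
  | x :: xs =>
      let a := (PySem.List.pyRange 0 14 1).foldl
        (fun acc y => acc ++ [PySem.List.pyGetD datos (x - y) ""]) []
      let b := PySem.Set.ofList a
      if b.length = a.length then x + 1 else parteDosA_go datos xs

def parteDos (datos : List String) : Int :=
  parteDosA_go datos (PySem.List.pyRange 13 (datos.length : Int) 1)

-- ===== PORT B =====
-- Source B: window of most recent distinct values (newest first); on a repeat, cut the window
-- just before the previous occurrence; return i+1 as soon as the window reaches length 14.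
def parteDosB_go : List String → Int → List String → Int
  | _, _, [] => -1
  | w, i, c :: rest =>
      let w1 := if w.contains c then w.take ((PySem.List.index? w c).getD 0) else w
      let w2 := c :: w1
      if w2.length = 14 then i + 1 else parteDosB_go w2 (i + 1) rest

def parteDos_alt (datos : List String) : Int := parteDosB_go [] 0 datos

-- ===== PRECONDITION & SPEC =====
def Spec_parteDos (datos : List String) (out : Int) : Prop := out = parteDos_alt datos
instance (datos : List String) (out : Int) : Decidable (Spec_parteDos datos out) := by unfold Spec_parteDos; infer_instance

-- ===== CLAIM (what is proved, stated in full; the proofs are below) =====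
def Claim_equal_parteDos : Prop := ∀ (datos : List String), Dom_parteDos datos → Spec_parteDos datos (parteDos datos)

-- ===== LEMMAS AND PROOFS =====

def lnp : List String → List String
  | [] => []
  | c :: l => c :: (lnp l).takeWhile (fun v => v != c)

theorem lnp_prefix (l : List String) : lnp l <+: l := by
  induction l with
  | nil => simp [lnp]
  | cons c l ih =>
      simpa [lnp] using ((lnp l).takeWhile_prefix _).trans ih

theorem lnp_nodup (l : List String) : (lnp l).Nodup := by
  induction l with
  | nil => simp [lnp]
  | cons c l ih =>
      simp only [lnp, List.nodup_cons]
      refine ⟨?_, List.Nodup.sublist ((lnp l).takeWhile_sublist _) ih⟩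
      intro hmem
      have := List.mem_takeWhile_imp hmem
      simp at this

theorem take_pref (l : List String) (k : Nat) (hk : k ≤ (lnp l).length) :
    l.take k = (lnp l).take k := by
  obtain ⟨t, ht⟩ := lnp_prefix l
  conv_lhs => rw [← ht]
  exact List.take_append_of_le_length hk

theorem take_nodup_of_le (l : List String) (k : Nat) (hk : k ≤ (lnp l).length) :
    (l.take k).Nodup := by
  rw [take_pref l k hk]
  exact (lnp_nodup l).sublist (List.take_sublist _ _)

theorem le_takeWhile_length (p : String → Bool) (xs : List String) (k : Nat)
    (hk : k ≤ xs.length) (h : ∀ x ∈ xs.take k, p x = true) :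
    k ≤ (xs.takeWhile p).length := by
  induction xs generalizing k with
  | nil => simpa using hk
  | cons a xs ih =>
      cases k with
      | zero => omega
      | succ k =>
          have ha : p a = true := h a (by simp)
          simp only [List.takeWhile_cons, ha, if_true, List.length_cons]
          have := ih k (by simpa using hk) (fun x hx => h x (by simp [hx]))
          omega

theorem le_lnp_of_take_nodup (l : List String) (k : Nat) (hk : k ≤ l.length)
    (h : (l.take k).Nodup) : k ≤ (lnp l).length := by
  induction l generalizing k with
  | nil => simpa [lnp] using hk
  | cons c l ih =>
      cases k with
      | zero => omega
      | succ k =>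
          simp only [List.take_succ_cons, List.nodup_cons] at h
          have hk' : k ≤ l.length := by simpa using hk
          have h1 : k ≤ (lnp l).length := ih k hk' h.2
          have hall : ∀ x ∈ (lnp l).take k, (x != c) = true := by
            intro x hx
            have hx' : x ∈ l.take k := by rw [take_pref l k h1]; exact hx
            have : x ≠ c := fun he => h.1 (he ▸ hx')
            simpa using this
          have := le_takeWhile_length (fun v => v != c) (lnp l) k h1 hall
          simp only [lnp, List.length_cons]
          omega

theorem takeWhile_ne_of_not_mem (w : List String) (c : String) (h : c ∉ w) :
    w.takeWhile (fun v => v != c) = w := by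
  induction w with
  | nil => rfl
  | cons a w ih =>
      simp only [List.mem_cons, not_or] at h
      have : (a != c) = true := by simpa using Ne.symm h.1
      simp only [List.takeWhile_cons, this, if_true]
      rw [ih h.2]

theorem window_update (w : List String) (c : String) :
    (if w.contains c then w.take ((PySem.List.index? w c).getD 0) else w)
      = w.takeWhile (fun v => v != c) := by
  induction w with
  | nil => rfl
  | cons a w ih =>
      by_cases hac : a = c
      · subst hac
        have h1 : (a :: w).contains a = true := by simp
        rw [h1, if_pos rfl, PySem.List.index?_cons_self]
        simp
      · have hne : (a != c) = true := by simpa using hac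
        by_cases hc : c ∈ w
        · have hcont : (a :: w).contains c = true := by
            simp [hc]
          rw [hcont, if_pos rfl]
          cases hidx : PySem.List.index? w c with
          | none => exact absurd hc ((PySem.List.index?_eq_none_iff w c).mp hidx)
          | some k =>
              rw [PySem.List.index?_cons_of_ne w hac, hidx]
              simp only [Option.map_some, Option.getD_some, List.take_succ_cons,
                List.takeWhile_cons, hne, if_true]
              have hcw : w.contains c = true := by simpa using hc
              rw [hcw, if_pos rfl, hidx] at ih
              simpa using ih
        · have hcont : (a :: w).contains c = false := by
            simp [hc, Ne.symm hac]
          rw [hcont]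
          simp only [Bool.false_eq_true, if_false, List.takeWhile_cons, hne, if_true]
          rw [takeWhile_ne_of_not_mem w c hc]

theorem length_discard_le {α : Type} [BEq α] (s : PySem.Set α) (x : α) :
    (PySem.Set.discard s x).length ≤ s.length := by
  simpa [PySem.Set.discard] using List.length_filter_le _ s

theorem length_discard_lt {α : Type} [BEq α] [LawfulBEq α] (s : PySem.Set α) (x : α)
    (h : x ∈ s) : (PySem.Set.discard s x).length < s.length := by
  simp only [PySem.Set.discard]
  rw [List.length_filter_lt_length_iff_exists]
  exact ⟨x, h, by simp⟩

theorem set_len_iff (a : List String) :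
    (PySem.Set.ofList a).length = a.length ↔ a.Nodup := by
  constructor
  · intro h
    induction a with
    | nil => simp
    | cons x xs ih =>
        rw [PySem.Set.ofList_cons] at h
        simp only [List.length_cons] at h
        have hle : ((PySem.Set.ofList xs).discard x).length ≤ (PySem.Set.ofList xs).length :=
          length_discard_le _ _
        have hle2 : (PySem.Set.ofList xs).length ≤ xs.length := PySem.Set.length_ofList_le xs
        have hofl : (PySem.Set.ofList xs).length = xs.length := by omega
        have hnd := ih hofl
        have hx : x ∉ xs := by
          intro hxm
          have := length_discard_lt (PySem.Set.ofList xs) x ((PySem.Set.mem_ofList xs x).mpr hxm)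
          omega
        simp [hx, hnd]
  · intro h
    rw [PySem.Set.ofList_eq_self_of_nodup a h]

def goodAt (datos : List String) (x : Nat) : Bool :=
  decide (((datos.take (x+1)).reverse.take 14).Nodup)

def refFind (datos : List String) : Int :=
  match (List.range' 13 (datos.length - 13)).find? (goodAt datos) with
  | some x => (x : Int) + 1
  | none => -1

theorem refFind_eq_neg_one (datos : List String)
    (h : ∀ x, 13 ≤ x → x < datos.length → goodAt datos x = false) :
    refFind datos = -1 := by
  unfold refFind
  have hn : (List.range' 13 (datos.length - 13)).find? (goodAt datos) = none := by
    rw [List.find?_eq_none]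
    intro x hx
    rw [List.mem_range'_1] at hx
    simp [h x hx.1 (by omega)]
  rw [hn]

theorem refFind_eq_some (datos : List String) (m : Nat) (h13 : 13 ≤ m)
    (hm : m < datos.length) (hgm : goodAt datos m = true)
    (hlt : ∀ x, 13 ≤ x → x < m → goodAt datos x = false) :
    refFind datos = (m : Int) + 1 := by
  unfold refFind
  have hsplit : List.range' 13 (datos.length - 13)
      = List.range' 13 (m - 13) ++ List.range' m (datos.length - m) := by
    have h := List.range'_append (s := 13) (m := m - 13) (n := datos.length - m) (step := 1)
    rw [show 13 + 1 * (m - 13) = m by omega] at h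
    rw [show (m - 13) + (datos.length - m) = datos.length - 13 by omega] at h
    exact h.symm
  rw [hsplit, List.find?_append]
  have h1 : (List.range' 13 (m - 13)).find? (goodAt datos) = none := by
    rw [List.find?_eq_none]
    intro x hx
    rw [List.mem_range'_1] at hx
    simp [hlt x hx.1 (by omega)]
  have h2 : List.range' m (datos.length - m) = m :: List.range' (m+1) (datos.length - m - 1) := by
    rw [show datos.length - m = (datos.length - m - 1) + 1 by omega, List.range'_succ]
    norm_num
  rw [h1, h2]
  simp [hgm]

theorem foldl_append_map (f : Int → String) (l : List Int) (init : List String) :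
    l.foldl (fun acc y => acc ++ [f y]) init = init ++ l.map f := by
  induction l generalizing init with
  | nil => simp
  | cons a l ih => simp [List.foldl_cons, ih]

theorem A_window (datos : List String) (m : Nat) (h13 : 13 ≤ m) (hm : m < datos.length) :
    (PySem.List.pyRange 0 14 1).foldl
      (fun acc y => acc ++ [PySem.List.pyGetD datos ((m : Int) - y) ""]) []
      = (datos.take (m+1)).reverse.take 14 := by
  rw [foldl_append_map, PySem.List.pyRange_one, List.map_map]
  simp only [List.nil_append]
  apply List.ext_getElem
  · simp; omega
  · intro j hj1 hj2
    simp only [List.getElem_map, List.getElem_range, Function.comp_apply]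
    have hj : j < 14 := by simpa using hj1
    have hidx : (m : Int) - (0 + (j : Int)) = ((m - j : Nat) : Int) := by omega
    rw [hidx, PySem.List.pyGetD_natCast]
    have hmj : m - j < datos.length := by omega
    rw [List.getElem_take, List.getElem_reverse, List.getElem_take]
    rw [List.getD_eq_getElem _ _ hmj]
    congr 1
    simp
    omega

theorem goodAt_eq (p rest : List String) (c : String) :
    goodAt (p ++ c :: rest) p.length
      = decide ((((p ++ [c]).reverse).take 14).Nodup) := by
  have h : (p ++ c :: rest).take (p.length + 1) = p ++ [c] := by
    rw [show p ++ c :: rest = (p ++ [c]) ++ rest by simp]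
    rw [List.take_append_of_le_length (by simp)]
    rw [List.take_of_length_le (by simp)]
  unfold goodAt
  rw [h]

theorem B_go_eq (rest : List String) : ∀ (datos p : List String),
    datos = p ++ rest →
    (lnp p.reverse).length ≤ 13 →
    (∀ x, 13 ≤ x → x < p.length → goodAt datos x = false) →
    parteDosB_go (lnp p.reverse) (p.length : Int) rest = refFind datos := by
  induction rest with
  | nil =>
      intro datos p hd hw hg
      simp only [parteDosB_go]
      exact (refFind_eq_neg_one datos (by intro x h1 h2; exact hg x h1 (by simp [hd] at h2 ⊢; omega))).symm
  | cons c rest ih =>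
      intro datos p hd hw hg
      simp only [parteDosB_go]
      rw [window_update]
      have hsnoc : c :: (lnp p.reverse).takeWhile (fun v => v != c)
          = lnp ((p ++ [c]).reverse) := by simp [lnp]
      by_cases h14 : (c :: (lnp p.reverse).takeWhile (fun v => v != c)).length = 14
      · rw [if_pos h14]
        have hrev : (p ++ [c]).reverse = c :: p.reverse := by simp
        have hlen14 : (lnp ((p ++ [c]).reverse)).length = 14 := by rw [← hsnoc]; exact h14
        rw [hrev] at hlen14
        have hplen : 14 ≤ p.length + 1 := by
          have := List.IsPrefix.length_le (lnp_prefix (c :: p.reverse))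
          simp at this; omega
        have hgm : goodAt datos p.length = true := by
          rw [hd, goodAt_eq, hrev]
          simp only [decide_eq_true_eq]
          exact take_nodup_of_le _ 14 (by omega)
        have href : refFind datos = (p.length : Int) + 1 := by
          apply refFind_eq_some datos p.length (by omega) (by simp [hd]) hgm
          intro x h1 h2
          exact hg x h1 h2
        rw [href]
      · rw [if_neg h14]
        have hw2 : (lnp ((p ++ [c]).reverse)).length ≤ 13 := by
          rw [← hsnoc]
          have h1 : ((lnp p.reverse).takeWhile (fun v => v != c)).length ≤ (lnp p.reverse).length :=
            List.Sublist.length_le (List.takeWhile_sublist _)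
          simp only [List.length_cons] at h14 ⊢
          omega
        have hg' : ∀ x, 13 ≤ x → x < (p ++ [c]).length → goodAt datos x = false := by
          intro x h1 h2
          simp only [List.length_append, List.length_cons, List.length_nil] at h2
          by_cases hx : x < p.length
          · exact hg x h1 hx
          · have hxe : x = p.length := by omega
            subst hxe
            rw [hd, goodAt_eq]
            simp only [decide_eq_false_iff_not]
            intro hnd
            have : 14 ≤ (lnp ((p ++ [c]).reverse)).length := by
              apply le_lnp_of_take_nodup _ 14 (by simp; omega) hnd
            omega
        have := ih datos (p ++ [c]) (by simp [hd]) (by exact hw2) hg'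
        rw [hsnoc]
        rw [show ((p.length : Int) + 1) = (((p ++ [c]).length : Nat) : Int) by simp]
        exact this

theorem A_go_eq (datos : List String) (k : Nat) : ∀ (m : Nat),
    datos.length - m = k → 13 ≤ m →
    (∀ x, 13 ≤ x → x < m → goodAt datos x = false) →
    parteDosA_go datos (PySem.List.pyRange (m : Int) (datos.length : Int) 1) = refFind datos := by
  induction k with
  | zero =>
      intro m hk h13 hg
      rw [PySem.List.pyRange_one_eq_nil (by omega)]
      simp only [parteDosA_go]
      exact (refFind_eq_neg_one datos (fun x h1 h2 => hg x h1 (by omega))).symm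
  | succ k ih =>
      intro m hk h13 hg
      have hm : m < datos.length := by omega
      rw [PySem.List.pyRange_one_cons (by exact_mod_cast hm)]
      simp only [parteDosA_go]
      rw [A_window datos m h13 hm]
      by_cases hgm : goodAt datos m = true
      · have hnd : ((datos.take (m+1)).reverse.take 14).Nodup := by
          simpa [goodAt] using hgm
        rw [if_pos ((set_len_iff _).mpr hnd)]
        exact (refFind_eq_some datos m h13 hm hgm hg).symm
      · have hnnd : ¬ ((datos.take (m+1)).reverse.take 14).Nodup := by
          simpa [goodAt] using hgm
        rw [if_neg (fun h => hnnd ((set_len_iff _).mp h))]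
        have hg' : ∀ x, 13 ≤ x → x < m + 1 → goodAt datos x = false := by
          intro x h1 h2
          by_cases hx : x < m
          · exact hg x h1 hx
          · have : x = m := by omega
            subst this
            simpa using hgm
        have := ih (m+1) (by omega) (by omega) hg'
        rw [show ((m : Int) + 1) = (((m+1 : Nat)) : Int) by push_cast; ring]
        exact this

theorem parteDos_eq_alt (datos : List String) : parteDos datos = parteDos_alt datos := by
  have hA : parteDos datos = refFind datos := by
    unfold parteDos
    have := A_go_eq datos (datos.length - 13) 13 rfl (by omega) (by omega)
    simpa using this
  have hB : parteDos_alt datos = refFind datos := by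
    unfold parteDos_alt
    have := B_go_eq datos datos [] (by simp) (by simp [lnp]) (by simp)
    simpa [lnp] using this
  rw [hA, hB]

-- ===== VERDICT (by name: the statement is the Claim_ definition above) =====
theorem parteDos_spec : Claim_equal_parteDos := by
  intro datos _
  unfold Spec_parteDos
  exact parteDos_eq_alt datos
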